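-- pv_equiv track=rewrite | github.com/vozmitelvlas/Projects | PIAA/lab1/PIAA_1.py | square_creator
-- ===== SOURCE A (Python) =====
-- def square_creator(square_size):  # fill the field with three squares (optimization)
--     square_field = []
--     for i in range(square_size):
--         square_field.append([])
--         for j in range(square_size):
--             if (i <= (square_size // 2)) and (j <= (square_size // 2)):
--                 square_field[i].append(1)
--             elif (i > (square_size // 2)) and j < square_size // 2:
--                 square_field[i].append(2)
--             elif (i < (square_size // 2)) and (j > square_size // 2):
--                 square_field[i].append(3)
--             else:
--                 square_field[i].append(0)
--
--     return square_field
-- ===== SOURCE B (Python) =====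
-- def square_creator(square_size):
--     n = square_size
--     if n <= 0:
--         return []
--     half = n // 2
--     top = [1] * (half + 1) + [3] * (n - half - 1)
--     mid = [1] * (half + 1) + [0] * (n - half - 1)
--     bot = [2] * half + [0] * (n - half)
--     return [row[:] for row in [top] * half + [mid] + [bot] * (n - half - 1)]
-- ===== Notes on version B (the rewrite author's own statement) =====
-- stated objective: simpler
-- what changed: Replaces the per-cell four-way branch inside nested loops by computing the half size once and assembling the grid from three precomputed row shapes (top/middle/bottom) repeated by block extents.
import Mathlib
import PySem

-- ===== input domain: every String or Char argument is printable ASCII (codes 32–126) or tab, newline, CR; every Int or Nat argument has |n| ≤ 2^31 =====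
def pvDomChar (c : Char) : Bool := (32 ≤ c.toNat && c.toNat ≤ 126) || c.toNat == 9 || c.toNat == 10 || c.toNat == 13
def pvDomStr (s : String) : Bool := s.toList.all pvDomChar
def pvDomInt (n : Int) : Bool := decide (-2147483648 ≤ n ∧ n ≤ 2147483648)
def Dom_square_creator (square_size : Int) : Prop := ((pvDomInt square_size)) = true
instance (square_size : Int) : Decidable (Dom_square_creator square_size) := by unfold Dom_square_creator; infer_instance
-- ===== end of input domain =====

-- B replaces A's per-cell four-way branch by three precomputed row shapes repeated blockwise (objective: simpler).

-- ===== PORT A =====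
-- the four-way branch of A's inner loop body
def pvCellA (n i j : Int) : Int :=
  if i ≤ PySem.Int.floordiv n 2 ∧ j ≤ PySem.Int.floordiv n 2 then 1
  else if PySem.Int.floordiv n 2 < i ∧ j < PySem.Int.floordiv n 2 then 2
  else if i < PySem.Int.floordiv n 2 ∧ PySem.Int.floordiv n 2 < j then 3
  else 0

def square_creator (square_size : Int) : List (List Int) :=
  (PySem.List.pyRange 0 square_size 1).foldl (fun field i =>
    field ++ [(PySem.List.pyRange 0 square_size 1).foldl
      (fun row j => row ++ [pvCellA square_size i j]) []]) []

-- ===== PORT B =====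
def square_creator_alt (square_size : Int) : List (List Int) :=
  if square_size ≤ 0 then []
  else
    let n := square_size
    let half := PySem.Int.floordiv n 2
    let top := List.replicate (half + 1).toNat (1 : Int) ++ List.replicate (n - half - 1).toNat 3
    let mid := List.replicate (half + 1).toNat (1 : Int) ++ List.replicate (n - half - 1).toNat 0
    let bot := List.replicate half.toNat (2 : Int) ++ List.replicate (n - half).toNat 0
    List.replicate half.toNat top ++ [mid] ++ List.replicate (n - half - 1).toNat bot

-- ===== PRECONDITION & SPEC =====
def Spec_square_creator (square_size : Int) (out : List (List Int)) : Prop := out = square_creator_alt square_size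
instance (square_size : Int) (out : List (List Int)) : Decidable (Spec_square_creator square_size out) := by unfold Spec_square_creator; infer_instance

-- ===== CLAIM (what is proved, stated in full; the proofs are below) =====
def Claim_equal_square_creator : Prop := ∀ (square_size : Int), Dom_square_creator square_size → Spec_square_creator square_size (square_creator square_size)

-- ===== LEMMAS AND PROOFS =====

theorem pv_foldl_snoc {α β : Type} (l : List α) (f : α → β) :
    ∀ init : List β, l.foldl (fun a x => a ++ [f x]) init = init ++ l.map f := by
  induction l with
  | nil => simp
  | cons x xs ih => intro init; simp [List.foldl_cons, ih]

theorem pv_map_replicate {α : Type} (a b : Int) (v : α) (f : Int → α)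
    (hf : ∀ j, a ≤ j → j < b → f j = v) :
    (PySem.List.pyRange a b 1).map f = List.replicate (b - a).toNat v := by
  rw [List.eq_replicate_iff]
  constructor
  · simp [PySem.List.length_pyRange_one]
  · intro x hx
    rcases List.mem_map.mp hx with ⟨j, hj, rfl⟩
    rcases (PySem.List.mem_pyRange_one).mp hj with ⟨h1, h2⟩
    exact hf j h1 h2

-- inner row shape: cells are c1 for 0 ≤ j < m, c2 for m ≤ j < n
theorem pv_inner_split (n m c1 c2 : Int) (h0 : 0 ≤ m) (hmn : m ≤ n) (f : Int → Int)
    (hf1 : ∀ j, 0 ≤ j → j < m → f j = c1) (hf2 : ∀ j, m ≤ j → j < n → f j = c2) :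
    (PySem.List.pyRange 0 n 1).map f = List.replicate m.toNat c1 ++ List.replicate (n - m).toNat c2 := by
  rw [PySem.List.pyRange_one_append 0 m n h0 hmn, List.map_append]
  congr 1
  · have := pv_map_replicate 0 m c1 f hf1
    simpa using this
  · exact pv_map_replicate m n c2 f hf2

-- outer shape: rows are t below m, md at m, bt above m
theorem pv_outer_split {α : Type} (n m : Int) (t md bt : α) (h0 : 0 ≤ m) (hmn : m < n)
    (f : Int → α)
    (hf1 : ∀ i, 0 ≤ i → i < m → f i = t) (hf2 : f m = md)
    (hf3 : ∀ i, m < i → i < n → f i = bt) :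
    (PySem.List.pyRange 0 n 1).map f
      = List.replicate m.toNat t ++ (md :: List.replicate (n - m - 1).toNat bt) := by
  rw [PySem.List.pyRange_one_append 0 m n h0 (by omega), PySem.List.pyRange_one_cons hmn,
      List.map_append, List.map_cons]
  congr 1
  · have := pv_map_replicate 0 m t (fun i => f i) hf1
    simpa using this
  · have htail := pv_map_replicate (m + 1) n bt (fun i => f i)
        (fun i hi1 hi2 => hf3 i (by omega) hi2)
    have hcnt : (n - (m + 1)).toNat = (n - m - 1).toNat := by omega
    rw [hf2, htail, hcnt]

theorem square_creator_spec' : ∀ n : Int, square_creator n = square_creator_alt n := by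
  intro n
  unfold square_creator square_creator_alt
  rw [pv_foldl_snoc]
  by_cases h : n ≤ 0
  · simp [PySem.List.pyRange_one_eq_nil h, h]
  · have hn : 0 < n := by omega
    have hfd : PySem.Int.floordiv n 2 = n / 2 := PySem.Int.floordiv_eq_ediv_of_pos (by omega)
    have hdiv1 : n / 2 < n := by omega
    have hdiv0 : 0 ≤ n / 2 := by omega
    simp only [if_neg h, List.nil_append, hfd]
    rw [List.append_assoc, List.singleton_append]
    have hrow : ∀ i : Int,
        (PySem.List.pyRange 0 n 1).foldl (fun row j => row ++ [pvCellA n i j]) []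
          = (PySem.List.pyRange 0 n 1).map (pvCellA n i) := by
      intro i
      rw [pv_foldl_snoc]
      simp
    apply pv_outer_split n (n / 2) _ _ _ hdiv0 hdiv1
    · -- top rows
      intro i hi1 hi2
      rw [hrow i]
      have := pv_inner_split n (n / 2 + 1) 1 3 (by omega) (by omega) (pvCellA n i)
        (by intro j hj1 hj2; simp only [pvCellA, hfd]; split_ifs <;> omega)
        (by intro j hj1 hj2; simp only [pvCellA, hfd]; split_ifs <;> omega)
      rw [this]
      congr 2
      omega
    · -- middle row
      rw [hrow (n / 2)]
      have := pv_inner_split n (n / 2 + 1) 1 0 (by omega) (by omega) (pvCellA n (n / 2))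
        (by intro j hj1 hj2; simp only [pvCellA, hfd]; split_ifs <;> omega)
        (by intro j hj1 hj2; simp only [pvCellA, hfd]; split_ifs <;> omega)
      rw [this]
      congr 2
      omega
    · -- bottom rows
      intro i hi1 hi2
      rw [hrow i]
      exact pv_inner_split n (n / 2) 2 0 (by omega) (by omega) (pvCellA n i)
        (by intro j hj1 hj2; simp only [pvCellA, hfd]; split_ifs <;> omega)
        (by intro j hj1 hj2; simp only [pvCellA, hfd]; split_ifs <;> omega)

-- ===== VERDICT (by name: the statement is the Claim_ definition above) =====
theorem square_creator_spec : Claim_equal_square_creator := by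
  intro n _
  unfold Spec_square_creator
  exact square_creator_spec' n
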